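-- pv_equiv track=rewrite | github.com/0Mayank/competi | nptel/week2/trouble_sort.py | sortable_by_trouble_sort
-- ===== SOURCE A (Python) =====
-- def sortable_by_trouble_sort(arr: list):
--     even = arr[0::2]
--     odd = arr[1::2]
--
--     even.sort()
--     odd.sort()
--
--     res = []
--     for i in range(len(arr)):
--         if i % 2 == 0:
--             res.append(even[i//2])
--         else:
--             res.append(odd[i//2])
--
--     sorted = True
--     for i in range(len(arr) - 1):
--         if res[i] > res[i+1]:
--             sorted = False
--             break
--
--     return sorted
-- ===== SOURCE B (Python) =====
-- def sortable_by_trouble_sort(arr: list):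
--     # Trouble sort's result is the interleaving of the sorted even- and odd-index
--     # halves; that interleaving is a permutation of arr, so it is sorted iff it
--     # equals sorted(arr), i.e. iff sorted(arr)'s even/odd slices ARE those halves.
--     s = sorted(arr)
--     return s[0::2] == sorted(arr[0::2]) and s[1::2] == sorted(arr[1::2])
-- ===== Notes on version B (the rewrite author's own statement) =====
-- stated objective: alternative
-- what changed: B uses the editorial characterization: instead of reconstructing the interleaved result and scanning it for order, it sorts the whole array once and checks that its even-index and odd-index slices equal the sorted even/odd halves (trouble sort's result is a permutation of arr, hence sorted iff equal to sorted(arr)); no adjacency comparison loop exists in B.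
import Mathlib
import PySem

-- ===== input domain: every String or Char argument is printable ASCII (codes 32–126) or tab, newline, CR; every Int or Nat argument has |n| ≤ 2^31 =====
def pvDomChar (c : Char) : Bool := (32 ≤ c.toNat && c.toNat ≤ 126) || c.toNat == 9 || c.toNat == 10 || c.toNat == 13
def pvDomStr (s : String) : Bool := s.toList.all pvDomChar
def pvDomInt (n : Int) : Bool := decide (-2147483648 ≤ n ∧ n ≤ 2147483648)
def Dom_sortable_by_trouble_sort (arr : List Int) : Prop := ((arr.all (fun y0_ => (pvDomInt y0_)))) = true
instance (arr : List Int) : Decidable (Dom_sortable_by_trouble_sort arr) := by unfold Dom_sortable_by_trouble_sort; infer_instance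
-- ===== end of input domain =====

-- B replaces A's rebuild-the-interleaving-and-scan with sorting the whole array once
-- and comparing its even/odd slices with the sorted halves (trouble sort's result is a
-- permutation of arr, hence sorted iff equal to sorted(arr)); objective: alternative.

-- ===== PORT A =====
-- the second loop of A: walks the index list, `break` = returning false immediately
def aScanLoop (res : List Int) : List Int → Bool
  | [] => true
  | i :: rest =>
    if PySem.List.pyGetD res i 0 > PySem.List.pyGetD res (i + 1) 0 then false
    else aScanLoop res rest

def sortable_by_trouble_sort (arr : List Int) : Bool :=
  -- arr[0::2] / arr[1::2]: slice? with step 2 always returns some (step ≠ 0), so getD [] is exact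
  let even := (PySem.List.slice? arr (some 0) none 2).getD []
  let odd := (PySem.List.slice? arr (some 1) none 2).getD []
  let even := PySem.List.sorted even (fun x => x) false
  let odd := PySem.List.sorted odd (fun x => x) false
  -- even[i//2] / odd[i//2] are always in range, so pyGetD with default 0 is exact
  let res := (PySem.List.pyRange 0 (arr.length : Int) 1).foldl
    (fun res i =>
      if PySem.Int.mod i 2 = 0 then res ++ [PySem.List.pyGetD even (PySem.Int.floordiv i 2) 0]
      else res ++ [PySem.List.pyGetD odd (PySem.Int.floordiv i 2) 0]) []
  aScanLoop res (PySem.List.pyRange 0 ((arr.length : Int) - 1) 1)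

-- ===== PORT B =====
def sortable_by_trouble_sort_alt (arr : List Int) : Bool :=
  let s := PySem.List.sorted arr (fun x => x) false
  ((PySem.List.slice? s (some 0) none 2).getD []
      == PySem.List.sorted ((PySem.List.slice? arr (some 0) none 2).getD []) (fun x => x) false)
  && ((PySem.List.slice? s (some 1) none 2).getD []
      == PySem.List.sorted ((PySem.List.slice? arr (some 1) none 2).getD []) (fun x => x) false)

-- ===== PRECONDITION & SPEC =====
def Spec_sortable_by_trouble_sort (arr : List Int) (out : Bool) : Prop := out = sortable_by_trouble_sort_alt arr
instance (arr : List Int) (out : Bool) : Decidable (Spec_sortable_by_trouble_sort arr out) := by unfold Spec_sortable_by_trouble_sort; infer_instance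

-- ===== CLAIM (what is proved, stated in full; the proofs are below) =====
def Claim_equal_sortable_by_trouble_sort : Prop := ∀ (arr : List Int), Dom_sortable_by_trouble_sort arr → Spec_sortable_by_trouble_sort arr (sortable_by_trouble_sort arr)

-- ===== LEMMAS AND PROOFS =====

-- every-other-element extraction: the value of a step-2 slice
def evensL : List Int → List Int
  | [] => []
  | [x] => [x]
  | a :: _ :: t => a :: evensL t

lemma length_evensL (xs : List Int) : (evensL xs).length = (xs.length + 1) / 2 := by
  induction xs using evensL.induct with
  | case1 => rfl
  | case2 => simp [evensL]
  | case3 a b t ih => simp [evensL, ih]; omega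

lemma evensL_cons (a : Int) (z : List Int) : evensL (a :: z) = a :: evensL z.tail := by
  cases z <;> rfl

lemma filterMap_step2 (xs : List Int) :
    (List.range ((xs.length + 1) / 2)).filterMap (fun k => xs[2 * k]?) = evensL xs := by
  induction xs using evensL.induct with
  | case1 => rfl
  | case2 x => simp [evensL]
  | case3 a b t ih =>
    have hlen : ((a :: b :: t).length + 1) / 2 = (t.length + 1) / 2 + 1 := by
      simp; omega
    rw [hlen, List.range_succ_eq_map, List.filterMap_cons]
    simp only [Nat.mul_zero, List.getElem?_cons_zero]
    rw [List.filterMap_map]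
    have : ((fun k => (a :: b :: t)[2 * k]?) ∘ (fun k => k + 1)) = fun k => t[2 * k]? := by
      funext k
      have h2 : 2 * (k + 1) = (2 * k + 1) + 1 := by omega
      simp [Function.comp, h2]
    rw [this, ih]
    rfl

lemma slice2_zero (xs : List Int) :
    (PySem.List.slice? xs (some 0) none 2).getD [] = evensL xs := by
  rw [← filterMap_step2]
  simp only [PySem.List.slice?, PySem.List.sliceIndices]
  norm_num
  have h1 : (if 0 < xs.length then (((xs.length:Int) + 2 - 1) / 2).toNat else 0) = (xs.length + 1) / 2 := by
    split_ifs <;> omega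
  rw [h1]
  have hfun : (fun x : Nat => xs[((2:Int) * (x:Int)).toNat]?) = fun k : Nat => xs[2 * k]? := by
    funext x
    rw [show ((2:Int) * (x:Int)).toNat = 2 * x from by omega]
  rw [hfun]

lemma slice2_one (xs : List Int) :
    (PySem.List.slice? xs (some 1) none 2).getD [] = evensL xs.tail := by
  have hnorm : (PySem.List.slice? xs (some 1) none 2).getD []
      = (List.range (xs.length / 2)).filterMap (fun (k : Nat) => xs[(min 1 (xs.length:Int) + 2 * (k:Int)).toNat]?) := by
    simp only [PySem.List.slice?, PySem.List.sliceIndices]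
    norm_num
    have h1 : (if 1 < xs.length then (((xs.length:Int) - min 1 (xs.length:Int) + 2 - 1) / 2).toNat else 0) = xs.length / 2 := by
      split_ifs <;> omega
    rw [h1]
  rw [hnorm]
  cases xs with
  | nil => rfl
  | cons a t =>
    have hf : (fun (k : Nat) => (a :: t)[(min 1 ((a :: t).length:Int) + 2 * (k:Int)).toNat]?)
        = fun k : Nat => t[2 * k]? := by
      funext k
      have hm : min 1 (((a :: t).length:Int)) = 1 := by simp
      have h2 : ((1:Int) + 2 * (k:Int)).toNat = (2 * k) + 1 := by omega
      rw [hm, h2, List.getElem?_cons_succ]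
    have hl : (a :: t).length / 2 = (t.length + 1) / 2 := by simp
    rw [hf, hl, filterMap_step2]
    rfl

lemma aScanLoop_eq_all (res : List Int) (idxs : List Int) :
    aScanLoop res idxs
      = idxs.all (fun i => decide (PySem.List.pyGetD res i 0 ≤ PySem.List.pyGetD res (i + 1) 0)) := by
  induction idxs with
  | nil => rfl
  | cons i rest ih =>
    simp only [aScanLoop, List.all_cons, ih]
    split_ifs with h
    · simp; omega
    · simp; omega

lemma pyRange_pred (n : Nat) :
    PySem.List.pyRange 0 ((n : Int) - 1) 1 = (List.range (n - 1)).map (fun k : Nat => (k : Int)) := by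
  cases n with
  | zero => decide
  | succ m =>
    have h : ((m + 1 : Nat) : Int) - 1 = (m : Int) := by push_cast; ring
    rw [h, PySem.List.pyRange_zero_natCast]
    simp

-- the staggered comparison conditions A's scan decides on the virtual interleaving
def MidCond (e o : List Int) : Prop :=
  (∀ i, i < o.length → e.getD i 0 ≤ o.getD i 0) ∧
  (∀ i, i + 1 < e.length → o.getD i 0 ≤ e.getD (i + 1) 0)

lemma A_iff' (arr : List Int) :
    sortable_by_trouble_sort arr = true ↔
      ∀ k, k < arr.length - 1 →
        (if k % 2 = 0
            then (PySem.List.sorted (evensL arr) (fun x => x) false).getD (k / 2) 0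
            else (PySem.List.sorted (evensL arr.tail) (fun x => x) false).getD (k / 2) 0)
          ≤ (if (k + 1) % 2 = 0
            then (PySem.List.sorted (evensL arr) (fun x => x) false).getD ((k + 1) / 2) 0
            else (PySem.List.sorted (evensL arr.tail) (fun x => x) false).getD ((k + 1) / 2) 0) := by
  unfold sortable_by_trouble_sort
  have hbody : ∀ (e o : List Int), (fun (res : List Int) (i : Int) =>
      if PySem.Int.mod i 2 = 0 then res ++ [PySem.List.pyGetD e (PySem.Int.floordiv i 2) 0]
      else res ++ [PySem.List.pyGetD o (PySem.Int.floordiv i 2) 0])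
      = fun res i => res ++ [if PySem.Int.mod i 2 = 0 then PySem.List.pyGetD e (PySem.Int.floordiv i 2) 0
                             else PySem.List.pyGetD o (PySem.Int.floordiv i 2) 0] := by
    intro e o; funext res i; split_ifs <;> rfl
  simp only [slice2_zero, slice2_one, hbody, PySem.List.foldl_append_singleton_eq_map,
    List.nil_append, PySem.List.pyRange_zero_natCast, List.map_map, aScanLoop_eq_all,
    pyRange_pred, List.all_map, List.all_eq_true, List.mem_range, Function.comp,
    decide_eq_true_eq]
  refine forall_congr' (fun k => imp_congr_right (fun hk => ?_))
  have hc : ((k:Int) + 1) = ((k + 1 : Nat) : Int) := by push_cast; ring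
  have hm : ∀ j : Nat, PySem.Int.mod (j:Int) 2 = ((j % 2 : Nat) : Int) := fun j => by
    rw [PySem.Int.mod_eq_emod_of_pos (by norm_num)]; omega
  have hd : ∀ j : Nat, PySem.Int.floordiv (j:Int) 2 = ((j / 2 : Nat) : Int) := fun j => by
    rw [PySem.Int.floordiv_eq_ediv_of_pos (by norm_num)]; omega
  rw [hc, PySem.List.pyGetD_natCast, PySem.List.pyGetD_natCast,
      PySem.List.getD_map_range _ _ _ _ (by omega), PySem.List.getD_map_range _ _ _ _ (by omega)]
  simp only [Function.comp_apply, hm, hd, PySem.List.pyGetD_natCast, Nat.cast_eq_zero]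

lemma cond_iff (e o : List Int) (n : Nat)
    (he : e.length = (n + 1) / 2) (ho : o.length = n / 2) :
    (∀ k, k < n - 1 →
        (if k % 2 = 0 then e.getD (k / 2) 0 else o.getD (k / 2) 0)
          ≤ (if (k + 1) % 2 = 0 then e.getD ((k + 1) / 2) 0 else o.getD ((k + 1) / 2) 0))
      ↔ MidCond e o := by
  constructor
  · intro h
    constructor
    · intro i hi
      have hk := h (2 * i) (by omega)
      rw [if_pos (by omega), if_neg (by omega),
          (by omega : 2 * i / 2 = i), (by omega : (2 * i + 1) / 2 = i)] at hk
      exact hk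
    · intro i hi
      have hk := h (2 * i + 1) (by omega)
      rw [if_neg (by omega), if_pos (by omega),
          (by omega : (2 * i + 1) / 2 = i), (by omega : (2 * i + 1 + 1) / 2 = i + 1)] at hk
      exact hk
  · rintro ⟨h1, h2⟩ k hk
    rcases Nat.even_or_odd k with ⟨j, hj⟩ | ⟨j, hj⟩
    · have hj' : k = 2 * j := by omega
      subst hj'
      rw [if_pos (by omega), if_neg (by omega),
          (by omega : 2 * j / 2 = j), (by omega : (2 * j + 1) / 2 = j)]
      exact h1 j (by omega)
    · have hj' : k = 2 * j + 1 := by omega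
      subst hj'
      rw [if_neg (by omega), if_pos (by omega),
          (by omega : (2 * j + 1) / 2 = j), (by omega : (2 * j + 1 + 1) / 2 = j + 1)]
      exact h2 j (by omega)

lemma A_iff (arr : List Int) :
    sortable_by_trouble_sort arr = true ↔
      MidCond (PySem.List.sorted (evensL arr) (fun x => x) false)
              (PySem.List.sorted (evensL arr.tail) (fun x => x) false) := by
  rw [A_iff']
  apply cond_iff _ _ arr.length
  · rw [PySem.List.length_sorted, length_evensL]
  · rw [PySem.List.length_sorted, length_evensL]
    cases arr <;> simp

-- the virtual interleaving of the two halves (trouble sort's result)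
def interleave : List Int → List Int → List Int
  | [], o => o
  | a :: e, o => a :: interleave o e
termination_by e o => e.length + o.length

lemma interleave_nil (o : List Int) : interleave [] o = o := by simp [interleave]

lemma interleave_cons (a : Int) (e o : List Int) :
    interleave (a :: e) o = a :: interleave o e := by simp [interleave]

lemma interleave_length : ∀ e o : List Int, (interleave e o).length = e.length + o.length := by
  intro e o
  induction e, o using interleave.induct with
  | case1 o => simp [interleave_nil]
  | case2 a e o ih => simp [interleave_cons, ih]; omega

lemma interleave_perm : ∀ e o : List Int, (interleave e o).Perm (e ++ o) := by
  intro e o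
  induction e, o using interleave.induct with
  | case1 o => simp [interleave_nil]
  | case2 a e o ih =>
    rw [interleave_cons]
    exact (ih.cons a).trans ((List.perm_append_comm).cons a)

lemma interleave_evensL (xs : List Int) : interleave (evensL xs) (evensL xs.tail) = xs := by
  induction xs using evensL.induct with
  | case1 => simp [evensL, interleave_nil]
  | case2 x => simp [evensL, interleave_nil, interleave_cons]
  | case3 a b t ih =>
    show interleave (evensL (a :: b :: t)) (evensL (b :: t)) = a :: b :: t
    rw [show evensL (a :: b :: t) = a :: evensL t from rfl, evensL_cons b t,
        interleave_cons, interleave_cons, ih]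

lemma halves_perm (arr : List Int) : (evensL arr ++ evensL arr.tail).Perm arr := by
  have h := interleave_perm (evensL arr) (evensL arr.tail)
  rw [interleave_evensL] at h
  exact h.symm

lemma evensL_interleave : ∀ e o : List Int, o.length ≤ e.length → e.length ≤ o.length + 1 →
    evensL (interleave e o) = e ∧ evensL (interleave e o).tail = o := by
  intro e o
  induction e, o using interleave.induct with
  | case1 o =>
    intro h1 _
    have : o = [] := by cases o with | nil => rfl | cons _ _ => simp at h1
    subst this
    rw [interleave_nil]
    exact ⟨rfl, rfl⟩
  | case2 a e o ih =>
    intro h1 h2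
    simp only [List.length_cons] at h1 h2
    obtain ⟨ih1, ih2⟩ := ih (by omega) (by omega)
    rw [interleave_cons]
    constructor
    · rw [evensL_cons, ih2]
    · rw [List.tail_cons, ih1]

lemma interleave_getD : ∀ e o : List Int, o.length ≤ e.length → e.length ≤ o.length + 1 →
    ∀ i : Nat, (interleave e o).getD (2 * i) 0 = e.getD i 0 ∧
               (interleave e o).getD (2 * i + 1) 0 = o.getD i 0 := by
  intro e o
  induction e, o using interleave.induct with
  | case1 o =>
    intro h1 _ i
    have : o = [] := by cases o with | nil => rfl | cons _ _ => simp at h1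
    subst this
    simp [interleave_nil]
  | case2 a e o ih =>
    intro h1 h2 i
    simp only [List.length_cons] at h1 h2
    have ih' := ih (by omega) (by omega)
    rw [interleave_cons]
    cases i with
    | zero =>
      refine ⟨rfl, ?_⟩
      show (a :: interleave o e).getD (0 + 1) 0 = o.getD 0 0
      rw [List.getD_cons_succ]
      exact (ih' 0).1
    | succ j =>
      constructor
      · rw [show 2 * (j + 1) = (2 * j + 1) + 1 from by omega, List.getD_cons_succ,
            List.getD_cons_succ]
        exact (ih' j).2
      · rw [show 2 * (j + 1) + 1 = (2 * j + 1 + 1) + 1 from by omega, List.getD_cons_succ,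
            show 2 * j + 1 + 1 = 2 * (j + 1) from by omega]
        exact (ih' (j + 1)).1

-- MidCond on two lists of interleavable lengths = the interleaving is (weakly) increasing
lemma mid_iff_pairwise (e o : List Int) (h1 : o.length ≤ e.length) (h2 : e.length ≤ o.length + 1) :
    MidCond e o ↔ (interleave e o).Pairwise (· ≤ ·) := by
  rw [← List.isChain_iff_pairwise, List.isChain_iff_getElem]
  have hlen := interleave_length e o
  have hK := interleave_getD e o h1 h2
  constructor
  · rintro ⟨hm1, hm2⟩ i hi
    rw [← List.getD_eq_getElem _ 0, ← List.getD_eq_getElem _ 0]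
    rcases Nat.even_or_odd i with ⟨j, hj⟩ | ⟨j, hj⟩
    · have hj' : i = 2 * j := by omega
      subst hj'
      rw [(hK j).1, (hK j).2]
      exact hm1 j (by omega)
    · have hj' : i = 2 * j + 1 := by omega
      subst hj'
      rw [(hK j).2, show 2 * j + 1 + 1 = 2 * (j + 1) from by omega, (hK (j + 1)).1]
      exact hm2 j (by omega)
  · intro h
    constructor
    · intro i hi
      have hr : 2 * i + 1 < (interleave e o).length := by omega
      have := h (2 * i) hr
      rwa [← List.getD_eq_getElem _ 0, ← List.getD_eq_getElem _ 0, (hK i).1, (hK i).2] at this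
    · intro i hi
      have hr : 2 * i + 1 + 1 < (interleave e o).length := by omega
      have := h (2 * i + 1) hr
      rwa [← List.getD_eq_getElem _ 0, ← List.getD_eq_getElem _ 0, (hK i).2,
           show 2 * i + 1 + 1 = 2 * (i + 1) from by omega, (hK (i + 1)).1] at this

-- B's slice comparisons say exactly "sorted(arr) IS the interleaving", which for the
-- sorted halves is the same as the interleaving being increasing
lemma slices_iff_pairwise (e o arr : List Int)
    (h1 : o.length ≤ e.length) (h2 : e.length ≤ o.length + 1)
    (hperm : (e ++ o).Perm arr) :
    (evensL (PySem.List.sorted arr (fun x => x) false) = e ∧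
       evensL (PySem.List.sorted arr (fun x => x) false).tail = o)
      ↔ (interleave e o).Pairwise (· ≤ ·) := by
  constructor
  · rintro ⟨hev, hod⟩
    have hz : interleave e o = PySem.List.sorted arr (fun x => x) false := by
      rw [← hev, ← hod, interleave_evensL]
    rw [hz]
    exact PySem.List.sorted_pairwise arr _
  · intro hpw
    have hz : PySem.List.sorted arr (fun x => x) false = interleave e o :=
      PySem.List.sorted_id_eq_of_perm_of_pairwise arr (interleave e o)
        ((interleave_perm e o).trans hperm) hpw
    obtain ⟨j1, j2⟩ := evensL_interleave e o h1 h2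
    rw [hz, j1, j2]
    exact ⟨rfl, rfl⟩

lemma B_iff (arr : List Int) :
    sortable_by_trouble_sort_alt arr = true ↔
      MidCond (PySem.List.sorted (evensL arr) (fun x => x) false)
              (PySem.List.sorted (evensL arr.tail) (fun x => x) false) := by
  have he : (PySem.List.sorted (evensL arr) (fun x => x) false).length = (arr.length + 1) / 2 := by
    rw [PySem.List.length_sorted, length_evensL]
  have ho : (PySem.List.sorted (evensL arr.tail) (fun x => x) false).length = arr.length / 2 := by
    rw [PySem.List.length_sorted, length_evensL]
    cases arr <;> simp
  have h1 : (PySem.List.sorted (evensL arr.tail) (fun x => x) false).length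
      ≤ (PySem.List.sorted (evensL arr) (fun x => x) false).length := by omega
  have h2 : (PySem.List.sorted (evensL arr) (fun x => x) false).length
      ≤ (PySem.List.sorted (evensL arr.tail) (fun x => x) false).length + 1 := by omega
  have hperm : ((PySem.List.sorted (evensL arr) (fun x => x) false)
      ++ (PySem.List.sorted (evensL arr.tail) (fun x => x) false)).Perm arr :=
    ((PySem.List.sorted_perm _ _ _).append (PySem.List.sorted_perm _ _ _)).trans (halves_perm arr)
  have hBform : sortable_by_trouble_sort_alt arr = true ↔
      (evensL (PySem.List.sorted arr (fun x => x) false)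
          = PySem.List.sorted (evensL arr) (fun x => x) false ∧
       evensL (PySem.List.sorted arr (fun x => x) false).tail
          = PySem.List.sorted (evensL arr.tail) (fun x => x) false) := by
    simp only [sortable_by_trouble_sort_alt, slice2_zero, slice2_one, Bool.and_eq_true, beq_iff_eq]
  rw [hBform, slices_iff_pairwise _ _ arr h1 h2 hperm, mid_iff_pairwise _ _ h1 h2]

-- ===== VERDICT (by name: the statement is the Claim_ definition above) =====
theorem sortable_by_trouble_sort_spec : Claim_equal_sortable_by_trouble_sort := by
  intro arr _
  unfold Spec_sortable_by_trouble_sort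
  exact Bool.eq_iff_iff.mpr ((A_iff arr).trans (B_iff arr).symm)
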